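-- pv_equiv track=rewrite | github.com/yanniklubas/use-case-interference | src/interference/profile.py | generate_stepwise
-- ===== SOURCE A (Python) =====
-- def generate_stepwise(
--     start_rps: int, steps: int, increase: int, repeats: int, step_duration: int
-- ) -> list[int]:
--     """Generate stepwise profile."""
--     total_step_duration = step_duration * repeats
--     profile: list[int] = []
--     for step in range(steps):
--         current_rps = start_rps + (step * increase)
--         profile.extend([current_rps for _ in range(total_step_duration)])
--     return profile
-- ===== SOURCE B (Python) =====
-- def generate_stepwise(
--     start_rps: int, steps: int, increase: int, repeats: int, step_duration: int
-- ) -> list[int]: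
--     """Generate stepwise profile in one flat pass.
--
--     Each position i of the output belongs to step i // tsd, so the whole
--     list is a single map over range(total) -- no nested loops, no extend.
--     """
--     tsd = step_duration * repeats
--     if steps <= 0 or tsd <= 0:
--         return []
--     return list(map(lambda i: start_rps + (i // tsd) * increase, range(steps * tsd)))
-- ===== Notes on version B (the rewrite author's own statement) =====
-- stated objective: alternative
-- what changed: Replaced A's nested loops (outer over steps, inner block built with extend) by a single flat map over range(steps*tsd) that recovers each element's step index by integer division.
import Mathlib
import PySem

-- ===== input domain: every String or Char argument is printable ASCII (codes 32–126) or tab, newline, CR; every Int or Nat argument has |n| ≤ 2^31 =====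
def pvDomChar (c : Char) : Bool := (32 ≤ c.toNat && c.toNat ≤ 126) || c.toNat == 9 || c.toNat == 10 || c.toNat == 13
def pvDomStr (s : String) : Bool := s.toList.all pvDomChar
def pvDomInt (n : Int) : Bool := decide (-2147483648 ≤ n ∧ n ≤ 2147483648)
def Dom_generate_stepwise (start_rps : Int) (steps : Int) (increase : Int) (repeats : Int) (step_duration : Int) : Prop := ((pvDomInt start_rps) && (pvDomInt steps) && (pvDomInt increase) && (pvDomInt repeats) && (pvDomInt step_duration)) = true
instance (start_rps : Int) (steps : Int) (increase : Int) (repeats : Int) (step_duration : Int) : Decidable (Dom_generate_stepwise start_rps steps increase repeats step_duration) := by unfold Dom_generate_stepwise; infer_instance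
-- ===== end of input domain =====

-- ===== PORT A =====
-- B changes the decomposition only: one flat map with index division instead of nested loops; same cost.
-- outer loop 'for step in range(steps)': structural recursion on the remaining count (steps - step)
def generate_stepwise_loop (start_rps : Int) (increase : Int) (tsd : Int) (steps : Int)
    (step : Int) (profile : List Int) : List Int :=
  if h : step < steps then
    let current_rps := start_rps + step * increase
    -- '[current_rps for _ in range(tsd)]' = the value repeated max(tsd,0) times
    generate_stepwise_loop start_rps increase tsd steps (step + 1)
      (profile ++ List.replicate tsd.toNat current_rps)
  else profile
termination_by (steps - step).toNat
decreasing_by omega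

def generate_stepwise (start_rps : Int) (steps : Int) (increase : Int) (repeats : Int) (step_duration : Int) : List Int :=
  let total_step_duration := step_duration * repeats
  generate_stepwise_loop start_rps increase total_step_duration steps 0 []

-- ===== PORT B =====
-- 'list(map(lambda i: start + (i // tsd) * inc, range(steps*tsd)))' ported as a map over pyRange
def generate_stepwise_alt (start_rps : Int) (steps : Int) (increase : Int) (repeats : Int) (step_duration : Int) : List Int :=
  let tsd := step_duration * repeats
  if steps ≤ 0 ∨ tsd ≤ 0 then []
  else (PySem.List.pyRange 0 (steps * tsd) 1).map
        (fun i => start_rps + PySem.Int.floordiv i tsd * increase)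

-- ===== PRECONDITION & SPEC =====
def Spec_generate_stepwise (start_rps : Int) (steps : Int) (increase : Int) (repeats : Int) (step_duration : Int) (out : List Int) : Prop := out = generate_stepwise_alt start_rps steps increase repeats step_duration
instance (start_rps : Int) (steps : Int) (increase : Int) (repeats : Int) (step_duration : Int) (out : List Int) : Decidable (Spec_generate_stepwise start_rps steps increase repeats step_duration out) := by unfold Spec_generate_stepwise; infer_instance

-- ===== CLAIM (what is proved, stated in full; the proofs are below) =====
def Claim_equal_generate_stepwise : Prop := ∀ (start_rps : Int) (steps : Int) (increase : Int) (repeats : Int) (step_duration : Int), Dom_generate_stepwise start_rps steps increase repeats step_duration → Spec_generate_stepwise start_rps steps increase repeats step_duration (generate_stepwise start_rps steps increase repeats step_duration)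

-- ===== LEMMAS AND PROOFS =====

theorem gsA_loop_char (start_rps increase tsd steps : Int) (step : Int) (profile : List Int) :
    generate_stepwise_loop start_rps increase tsd steps step profile =
    profile ++ (PySem.List.pyRange step steps 1).flatMap
      (fun s => List.replicate tsd.toNat (start_rps + s * increase)) := by
  by_cases h : step < steps
  · rw [generate_stepwise_loop, dif_pos h, gsA_loop_char,
        PySem.List.pyRange_one_cons h]
    simp
  · rw [generate_stepwise_loop, dif_neg h,
        PySem.List.pyRange_one_eq_nil (by omega)]
    simp
termination_by (steps - step).toNat
decreasing_by omega

-- the block of indices [n*t, (n+1)*t) all have floordiv = n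
theorem pv_block_map (start inc : Int) (t : Int) (ht : 0 < t) (n : Int) :
    (PySem.List.pyRange (n*t) ((n+1)*t) 1).map
      (fun i => start + PySem.Int.floordiv i t * inc) =
    List.replicate t.toNat (start + n * inc) := by
  rw [PySem.List.pyRange_one]
  have h1 : ((n+1)*t - n*t) = t := by ring
  simp only [h1, List.map_map]
  rw [List.eq_replicate_iff]
  constructor
  · simp
  · intro b hb
    simp only [List.mem_map, List.mem_range, Function.comp] at hb
    obtain ⟨k, hk, rfl⟩ := hb
    have hk' : (k : Int) < t := by omega
    have : PySem.Int.floordiv (n*t + (k:Int)) t = n := by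
      rw [PySem.Int.floordiv_eq_iff_of_pos ht]
      constructor
      · omega
      · nlinarith
    rw [this]

theorem pv_main (start inc : Int) (t : Int) (ht : 0 < t) (n : Nat) :
    (PySem.List.pyRange 0 ((n:Int)*t) 1).map
      (fun i => start + PySem.Int.floordiv i t * inc) =
    (PySem.List.pyRange 0 (n:Int) 1).flatMap
      (fun s => List.replicate t.toNat (start + s * inc)) := by
  induction n with
  | zero => simp [PySem.List.pyRange_one_eq_nil]
  | succ m ih =>
    have hsplit : PySem.List.pyRange 0 (((m:Int)+1)*t) 1 =
        PySem.List.pyRange 0 ((m:Int)*t) 1 ++ PySem.List.pyRange ((m:Int)*t) (((m:Int)+1)*t) 1 := by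
      apply PySem.List.pyRange_one_append
      · positivity
      · nlinarith
    have hsucc : PySem.List.pyRange 0 ((m:Int)+1) 1 =
        PySem.List.pyRange 0 (m:Int) 1 ++ [(m:Int)] :=
      PySem.List.pyRange_one_succ_right (by positivity)
    push_cast
    rw [hsplit, List.map_append, ih, hsucc, List.flatMap_append,
        pv_block_map start inc t ht (m:Int)]
    simp

-- ===== VERDICT (by name: the statement is the Claim_ definition above) =====
theorem generate_stepwise_spec : Claim_equal_generate_stepwise := by
  intro start_rps steps increase repeats step_duration _
  unfold Spec_generate_stepwise generate_stepwise generate_stepwise_alt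
  simp only []
  set tsd := step_duration * repeats with htsd
  rw [gsA_loop_char]
  by_cases h : steps ≤ 0 ∨ tsd ≤ 0
  · rw [if_pos h]
    rcases h with h | h
    · rw [PySem.List.pyRange_one_eq_nil h]; simp
    · have : tsd.toNat = 0 := by omega
      simp [this]
  · push Not at h
    obtain ⟨hs, ht⟩ := h
    rw [if_neg (by push Not; omega)]
    obtain ⟨n, rfl⟩ : ∃ n : Nat, steps = (n : Int) := ⟨steps.toNat, by omega⟩
    rw [pv_main start_rps increase tsd ht n]
    simp
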